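-- pv_equiv track=rewrite | github.com/polyphony-dev/polyphony | tests/loop/while09.py | while09
-- ===== SOURCE A (Python) =====
-- def while09(n):
--     x = 1
--     while True:
--         y = x
--         x = 2
--         n -= 1
--         if n < 0:
--             break
--
--     return y
-- ===== SOURCE B (Python) =====
-- def while09(n):
--     # Closed form: the loop returns 1 iff it breaks on the first iteration (n-1 < 0), else 2.
--     return 1 if n < 1 else 2
-- ===== Notes on version B (the rewrite author's own statement) =====
-- stated objective: simpler
-- what changed: Replaced the countdown while-loop with a single closed-form comparison returning one of two constants.
import Mathlib
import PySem

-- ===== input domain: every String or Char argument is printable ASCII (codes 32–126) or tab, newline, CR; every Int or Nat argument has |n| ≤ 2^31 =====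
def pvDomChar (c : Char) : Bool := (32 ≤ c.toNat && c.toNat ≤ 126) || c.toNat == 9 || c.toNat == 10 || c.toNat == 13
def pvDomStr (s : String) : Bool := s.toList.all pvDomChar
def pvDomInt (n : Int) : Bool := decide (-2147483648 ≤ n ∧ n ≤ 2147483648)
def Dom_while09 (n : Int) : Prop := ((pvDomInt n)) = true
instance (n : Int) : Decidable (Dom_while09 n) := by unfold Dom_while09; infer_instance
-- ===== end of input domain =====

-- B replaces A's countdown loop with one closed-form comparison (simpler, O(1)).

-- ===== PORT A =====
-- Loop body: y := x; x := 2; n := n - 1; break (returning y) when n < 0.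
def while09Loop (n x : Int) : Int :=
  let y := x
  let x' := 2
  let n' := n - 1
  if n' < 0 then y else while09Loop n' x'
termination_by n.toNat
decreasing_by
  have h : ¬ (n - 1 < 0) := by assumption
  omega

def while09 (n : Int) : Int := while09Loop n 1

-- ===== PORT B =====
def while09_alt (n : Int) : Int := if n < 1 then 1 else 2

-- ===== PRECONDITION & SPEC =====
def Spec_while09 (n : Int) (out : Int) : Prop := out = while09_alt n
instance (n : Int) (out : Int) : Decidable (Spec_while09 n out) := by unfold Spec_while09; infer_instance

-- ===== CLAIM (what is proved, stated in full; the proofs are below) =====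
def Claim_equal_while09 : Prop := ∀ (n : Int), Dom_while09 n → Spec_while09 n (while09 n)

-- ===== LEMMAS AND PROOFS =====
theorem while09Loop_ge_one (n : Int) (h : 1 ≤ n) : while09Loop n 2 = 2 := by
  induction n, h using Int.le_induction with
  | base => unfold while09Loop; norm_num; unfold while09Loop; norm_num
  | succ m hm ih =>
    unfold while09Loop
    have hne : ¬ (m + 1 - 1 < 0) := by omega
    simp only [hne, if_false]
    have hm' : m + 1 - 1 = m := by ring
    rw [hm']
    exact ih

-- ===== VERDICT (by name: the statement is the Claim_ definition above) =====
theorem while09_spec : Claim_equal_while09 := by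
  intro n _
  unfold Spec_while09 while09_alt while09
  by_cases h : n < 1
  · unfold while09Loop
    have : n - 1 < 0 := by omega
    simp [this, h]
  · rw [if_neg h]
    unfold while09Loop
    have hne : ¬ (n - 1 < 0) := by omega
    simp only [hne, if_false]
    by_cases h1 : 1 ≤ n - 1
    · exact while09Loop_ge_one _ h1
    · have : n - 1 = 0 := by omega
      rw [this]; unfold while09Loop; norm_num
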